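-- pv_equiv track=rewrite | github.com/Judongsung/algorithm | 백준/Silver/2304. 창고 다각형/창고 다각형.py | figure_out_area
-- ===== SOURCE A (Python) =====
-- from heapq import heapify, heappop
--
-- def figure_out_area(pillars: list) -> int:
--     area = 0
--     heap = [(-height, pos) for pos, height in pillars]
--     heapify(heap)
--
--     height, pos = heappop(heap)
--     height = -height
--     area += height
--     checked_left, checked_right = pos, pos
--
--     while heap:
--         height, pos = heappop(heap)
--         height = -height
--
--         if pos < checked_left:
--             area += (checked_left-pos)*height
--             checked_left = pos
--         elif pos > checked_right:
--             area += (pos-checked_right)*height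
--             checked_right = pos
--
--     return area
-- ===== SOURCE B (Python) =====
-- def figure_out_area(pillars: list) -> int:
--     best = {}
--     for pos, h in pillars:
--         if pos not in best or h > best[pos]:
--             best[pos] = h
--     cols = sorted(best.items())              # (pos, height), distinct pos ascending
--     peak_h = max(h for _, h in cols)
--     i = [h for _, h in cols].index(peak_h)
--     left, right = cols[:i + 1], cols[i:]
--     area = peak_h
--     run = left[0][1]
--     for (x0, h0), (x1, _) in zip(left, left[1:]):
--         run = max(run, h0)
--         area += (x1 - x0) * run
--     run = right[-1][1]
--     for (x0, _), (x1, h1) in reversed(list(zip(right, right[1:]))):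
--         run = max(run, h1)
--         area += (x1 - x0) * run
--     return area
-- ===== Notes on version B (the rewrite author's own statement) =====
-- stated objective: alternative
-- what changed: Replaces the heap (pop pillars in decreasing height order, extending a covered interval) by dedup-to-per-position-maximum, sort by position, and two running-maximum sweeps from the tallest pillar's position toward the leftmost and rightmost pillars.
import Mathlib
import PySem

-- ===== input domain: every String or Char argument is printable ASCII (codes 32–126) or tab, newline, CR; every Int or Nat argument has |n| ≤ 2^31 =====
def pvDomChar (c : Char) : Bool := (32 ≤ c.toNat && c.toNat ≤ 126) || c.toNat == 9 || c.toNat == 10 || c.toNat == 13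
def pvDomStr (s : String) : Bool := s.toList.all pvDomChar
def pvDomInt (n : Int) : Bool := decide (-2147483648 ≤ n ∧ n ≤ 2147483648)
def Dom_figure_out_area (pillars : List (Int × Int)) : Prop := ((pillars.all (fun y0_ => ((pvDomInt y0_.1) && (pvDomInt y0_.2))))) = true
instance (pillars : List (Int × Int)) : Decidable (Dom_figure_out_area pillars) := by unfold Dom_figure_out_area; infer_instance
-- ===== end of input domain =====

-- B is a heap-free re-implementation: dedup pillars to their per-position maximum,
-- sort by position, and sweep left/right toward the tallest pillar with a running
-- maximum (objective: alternative algorithm, no heap).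

-- ===== PORT A =====
-- Python tuple '<' on (Int × Int), lexicographic (exact for int pairs).
def pvKeyLt (x y : Int × Int) : Bool := x.1 < y.1 || (x.1 == y.1 && x.2 < y.2)

-- stdlib heapq modelled by its value contract: a heapified list yields, per heappop,
-- the smallest remaining value (tuples compared lexicographically); pvSelMin returns
-- that smallest value and the remaining values.
def pvSelMin : (Int × Int) → List (Int × Int) → (Int × Int) × List (Int × Int)
  | m, [] => (m, [])
  | m, y :: ys =>
      if pvKeyLt y m then
        let r := pvSelMin y ys
        (r.1, m :: r.2)
      else
        let r := pvSelMin m ys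
        (r.1, y :: r.2)

theorem pvSelMin_len (m : Int × Int) (ys : List (Int × Int)) :
    (pvSelMin m ys).2.length = ys.length := by
  induction ys generalizing m with
  | nil => simp [pvSelMin]
  | cons y t ih => simp only [pvSelMin]; split <;> simp [ih]

-- the 'while heap:' loop of A, state (area, checked_left, checked_right)
def pvLoopA : List (Int × Int) → Int → Int → Int → Int
  | [], area, _, _ => area
  | y :: ys, area, cl, cr =>
      let s := pvSelMin y ys
      let h := -s.1.1
      let p := s.1.2
      if p < cl then pvLoopA s.2 (area + (cl - p) * h) p cr
      else if p > cr then pvLoopA s.2 (area + (p - cr) * h) cl p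
      else pvLoopA s.2 area cl cr
  termination_by l => l.length
  decreasing_by all_goals simp [pvSelMin_len]

def figure_out_area (pillars : List (Int × Int)) : Int :=
  let heap := pillars.map (fun q => (-q.2, q.1))
  match heap with
  | [] => 0   -- Python raises IndexError on the first heappop; excluded by Pre_
  | y :: ys =>
      let s := pvSelMin y ys
      pvLoopA s.2 (-s.1.1) s.1.2 s.1.2

-- ===== PORT B =====
-- the 'best' dict loop of Source B
def pvBest (pillars : List (Int × Int)) : PySem.Dict Int Int :=
  pillars.foldl
    (fun d q =>
      match PySem.Dict.get? d q.1 with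
      | none => PySem.Dict.insert d q.1 q.2
      | some v => if q.2 > v then PySem.Dict.insert d q.1 q.2 else d)
    PySem.Dict.empty

-- one left-sweep step and one (reversed) right-sweep step of Source B
def pvStepL (s : Int × Int) (pq : (Int × Int) × (Int × Int)) : Int × Int :=
  let run := max s.1 pq.1.2
  (run, s.2 + (pq.2.1 - pq.1.1) * run)

def pvStepR (s : Int × Int) (pq : (Int × Int) × (Int × Int)) : Int × Int :=
  let run := max s.1 pq.2.2
  (run, s.2 + (pq.2.1 - pq.1.1) * run)

def figure_out_area_alt (pillars : List (Int × Int)) : Int :=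
  let best := pvBest pillars
  -- sorted(best.items()): dict keys are unique, so Python's lexicographic tuple
  -- sort coincides with the stable sort by first component
  let cols := PySem.List.sorted best.items Prod.fst false
  match PySem.List.max? (cols.map Prod.snd) (fun y => y) with
  | none => 0   -- empty: Python's max(...) raises ValueError; excluded by Pre_
  | some peakh =>
      let i := (PySem.List.index? (cols.map Prod.snd) peakh).getD 0
      let left := cols.take (i + 1)
      let right := cols.drop i
      let s1 := (left.zip (left.drop 1)).foldl pvStepL ((left.headD (0, 0)).2, peakh)
      let s2 := ((right.zip (right.drop 1)).reverse).foldl pvStepR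
        ((right.getLastD (0, 0)).2, s1.2)
      s2.2

-- ===== PRECONDITION & SPEC =====
-- Pre_ excludes only the empty list, on which A raises IndexError (first heappop).
def Pre_figure_out_area (pillars : List (Int × Int)) : Prop := pillars ≠ []
instance (pillars : List (Int × Int)) : Decidable (Pre_figure_out_area pillars) := by
  unfold Pre_figure_out_area; infer_instance

def pvWitness_figure_out_area : (List (Int × Int)) := [(2, 4), (1, 1), (5, 3), (3, 1)]

def Spec_figure_out_area (pillars : List (Int × Int)) (out : Int) : Prop := out = figure_out_area_alt pillars
instance (pillars : List (Int × Int)) (out : Int) : Decidable (Spec_figure_out_area pillars out) := by unfold Spec_figure_out_area; infer_instance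

-- ===== CLAIM (what is proved, stated in full; the proofs are below) =====
def Claim_equal_figure_out_area : Prop := ∀ (pillars : List (Int × Int)), Dom_figure_out_area pillars → Pre_figure_out_area pillars → Spec_figure_out_area pillars (figure_out_area pillars)

-- ===== LEMMAS AND PROOFS =====

-- ---- generic max/min toolkit (max?/min? with default, used only on nonempty lists) ----
def pvMaxD (l : List Int) : Int := l.max?.getD 0
def pvMinD (l : List Int) : Int := l.min?.getD 0

theorem pvMaxD_mem {l : List Int} (h : l ≠ []) : pvMaxD l ∈ l := by
  unfold pvMaxD
  cases hm : l.max? with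
  | none => rw [List.max?_eq_none_iff] at hm; exact absurd hm h
  | some m => simpa using List.max?_mem hm
theorem pvLe_maxD {l : List Int} {a : Int} (h : a ∈ l) : a ≤ pvMaxD l := by
  unfold pvMaxD
  cases hm : l.max? with
  | none => rw [List.max?_eq_none_iff] at hm; subst hm; simp at h
  | some m => exact le_of_le_of_eq ((List.max?_eq_some_iff.mp hm).2 a h) rfl
theorem pvMaxD_le {l : List Int} {c : Int} (h : l ≠ []) (hub : ∀ a ∈ l, a ≤ c) : pvMaxD l ≤ c := by
  exact hub _ (pvMaxD_mem h)
theorem pvMinD_mem {l : List Int} (h : l ≠ []) : pvMinD l ∈ l := by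
  unfold pvMinD
  cases hm : l.min? with
  | none => rw [List.min?_eq_none_iff] at hm; exact absurd hm h
  | some m => simpa using List.min?_mem hm
theorem pvMinD_le {l : List Int} {a : Int} (h : a ∈ l) : pvMinD l ≤ a := by
  unfold pvMinD
  cases hm : l.min? with
  | none => rw [List.min?_eq_none_iff] at hm; subst hm; simp at h
  | some m => exact le_of_eq_of_le rfl ((List.min?_eq_some_iff.mp hm).2 a h)
theorem pvLe_minD {l : List Int} {c : Int} (h : l ≠ []) (hlb : ∀ a ∈ l, c ≤ a) : c ≤ pvMinD l := by
  exact hlb _ (pvMinD_mem h)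
theorem pvMaxD_eq_of {l l' : List Int} (h1 : l ≠ []) (h2 : l' ≠ [])
    (h3 : ∀ a ∈ l, ∃ b ∈ l', a ≤ b) (h4 : ∀ a ∈ l', ∃ b ∈ l, a ≤ b) :
    pvMaxD l = pvMaxD l' := by
  apply le_antisymm
  · apply pvMaxD_le h1
    intro a ha
    obtain ⟨b, hb, hab⟩ := h3 a ha
    exact le_trans hab (pvLe_maxD hb)
  · apply pvMaxD_le h2
    intro a ha
    obtain ⟨b, hb, hab⟩ := h4 a ha
    exact le_trans hab (pvLe_maxD hb)
theorem pvMinD_eq_of {l l' : List Int} (h1 : l ≠ []) (h2 : l' ≠ [])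
    (h3 : ∀ a ∈ l, ∃ b ∈ l', b ≤ a) (h4 : ∀ a ∈ l', ∃ b ∈ l, b ≤ a) :
    pvMinD l = pvMinD l' := by
  apply le_antisymm
  · apply pvLe_minD h2
    intro a ha
    obtain ⟨b, hb, hab⟩ := h4 a ha
    exact le_trans (pvMinD_le hb) hab
  · apply pvLe_minD h1
    intro a ha
    obtain ⟨b, hb, hab⟩ := h3 a ha
    exact le_trans (pvMinD_le hb) hab

-- ---- interval-sum toolkit ----
theorem pvSumIcoSplit (f : Int → Int) {a b c : Int} (h1 : a ≤ b) (h2 : b ≤ c) :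
    ∑ x ∈ Finset.Ico a c, f x = (∑ x ∈ Finset.Ico a b, f x) + ∑ x ∈ Finset.Ico b c, f x := by
  rw [← Finset.sum_union (Finset.Ico_disjoint_Ico_consecutive a b c),
    Finset.Ico_union_Ico_eq_Ico h1 h2]
theorem pvSumIcoConst (f : Int → Int) {a b v : Int} (h1 : a ≤ b)
    (hc : ∀ x, a ≤ x → x < b → f x = v) :
    ∑ x ∈ Finset.Ico a b, f x = (b - a) * v := by
  have he : ∑ x ∈ Finset.Ico a b, f x = ∑ _x ∈ Finset.Ico a b, v :=
    Finset.sum_congr rfl (fun x hx => by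
      rw [Finset.mem_Ico] at hx
      exact hc x hx.1 hx.2)
  rw [he, Finset.sum_const, Int.card_Ico, nsmul_eq_mul, Int.toNat_of_nonneg (by omega),
    mul_comm]

-- ---- the common mathematical value: the warehouse-roof column sum ----
def pvLmax (P : List (Int × Int)) (x : Int) : Int :=
  pvMaxD ((P.filter (fun q => decide (q.1 ≤ x))).map Prod.snd)
def pvRmax (P : List (Int × Int)) (x : Int) : Int :=
  pvMaxD ((P.filter (fun q => decide (x ≤ q.1))).map Prod.snd)
def pvRoof (P : List (Int × Int)) (x : Int) : Int := min (pvLmax P x) (pvRmax P x)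
def pvLo (P : List (Int × Int)) : Int := pvMinD (P.map Prod.fst)
def pvHi (P : List (Int × Int)) : Int := pvMaxD (P.map Prod.fst)
noncomputable def pvPhi (P : List (Int × Int)) : Int :=
  ∑ x ∈ Finset.Ico (pvLo P) (pvHi P + 1), pvRoof P x

theorem pvMemL {L : List (Int × Int)} {x a : Int} :
    a ∈ (L.filter (fun q => decide (q.1 ≤ x))).map Prod.snd ↔ ∃ r ∈ L, r.1 ≤ x ∧ r.2 = a := by
  simp only [List.mem_map, List.mem_filter, decide_eq_true_eq]
  tauto

theorem pvMemR {L : List (Int × Int)} {x a : Int} :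
    a ∈ (L.filter (fun q => decide (x ≤ q.1))).map Prod.snd ↔ ∃ r ∈ L, x ≤ r.1 ∧ r.2 = a := by
  simp only [List.mem_map, List.mem_filter, decide_eq_true_eq]
  tauto

theorem pvMemE {L : List (Int × Int)} {k a : Int} :
    a ∈ (L.filter (fun q => decide (q.1 = k))).map Prod.snd ↔ ∃ r ∈ L, r.1 = k ∧ r.2 = a := by
  simp only [List.mem_map, List.mem_filter, decide_eq_true_eq]
  tauto

theorem pvLo_le {P : List (Int × Int)} {r : Int × Int} (h : r ∈ P) : pvLo P ≤ r.1 := by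
  exact pvMinD_le (List.mem_map_of_mem h)
theorem pvLe_hi {P : List (Int × Int)} {r : Int × Int} (h : r ∈ P) : r.1 ≤ pvHi P := by
  exact pvLe_maxD (List.mem_map_of_mem h)
theorem pvLo_mem {P : List (Int × Int)} (h : P ≠ []) : ∃ r ∈ P, r.1 = pvLo P := by
  have hm : pvMinD (P.map Prod.fst) ∈ P.map Prod.fst :=
    pvMinD_mem (by simpa using h)
  obtain ⟨r, hr, hr2⟩ := List.mem_map.mp hm
  exact ⟨r, hr, hr2⟩
theorem pvHi_mem {P : List (Int × Int)} (h : P ≠ []) : ∃ r ∈ P, r.1 = pvHi P := by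
  have hm : pvMaxD (P.map Prod.fst) ∈ P.map Prod.fst :=
    pvMaxD_mem (by simpa using h)
  obtain ⟨r, hr, hr2⟩ := List.mem_map.mp hm
  exact ⟨r, hr, hr2⟩
theorem pvLe_lmax {P : List (Int × Int)} {r : Int × Int} {x : Int} (h : r ∈ P) (hx : r.1 ≤ x) :
    r.2 ≤ pvLmax P x := by
  exact pvLe_maxD (pvMemL.mpr ⟨r, h, hx, rfl⟩)
theorem pvLe_rmax {P : List (Int × Int)} {r : Int × Int} {x : Int} (h : r ∈ P) (hx : x ≤ r.1) :
    r.2 ≤ pvRmax P x := by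
  exact pvLe_maxD (pvMemR.mpr ⟨r, h, hx, rfl⟩)
theorem pvMaxD_perm {l l' : List Int} (h : l.Perm l') : pvMaxD l = pvMaxD l' := by
  cases l with
  | nil => rw [(List.Perm.eq_nil h.symm : l' = [])]
  | cons a t =>
    have h2 : l' ≠ [] := fun he => by simp [he] at h
    exact pvMaxD_eq_of (by simp) h2
      (fun a ha => ⟨a, h.mem_iff.mp ha, le_refl a⟩)
      (fun a ha => ⟨a, h.mem_iff.mpr ha, le_refl a⟩)

theorem pvMinD_perm {l l' : List Int} (h : l.Perm l') : pvMinD l = pvMinD l' := by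
  cases l with
  | nil => rw [(List.Perm.eq_nil h.symm : l' = [])]
  | cons a t =>
    have h2 : l' ≠ [] := fun he => by simp [he] at h
    exact pvMinD_eq_of (by simp) h2
      (fun a ha => ⟨a, h.mem_iff.mp ha, le_refl a⟩)
      (fun a ha => ⟨a, h.mem_iff.mpr ha, le_refl a⟩)

theorem pvLmax_perm {P P' : List (Int × Int)} (h : P.Perm P') (x : Int) :
    pvLmax P x = pvLmax P' x :=
  pvMaxD_perm ((h.filter _).map _)

theorem pvRmax_perm {P P' : List (Int × Int)} (h : P.Perm P') (x : Int) :
    pvRmax P x = pvRmax P' x :=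
  pvMaxD_perm ((h.filter _).map _)

theorem pvPhi_perm {P P' : List (Int × Int)} (h : P.Perm P') : pvPhi P = pvPhi P' := by
  unfold pvPhi pvLo pvHi
  rw [pvMinD_perm (h.map _), pvMaxD_perm (h.map _)]
  exact Finset.sum_congr rfl (fun x _ => by
    unfold pvRoof
    rw [pvLmax_perm h, pvRmax_perm h])

theorem pvLo_singleton (p h : Int) : pvLo [(p, h)] = p := by
  simp [pvLo, pvMinD]
theorem pvHi_singleton (p h : Int) : pvHi [(p, h)] = p := by
  simp [pvHi, pvMaxD]
theorem pvPhi_singleton (p h : Int) : pvPhi [(p, h)] = h := by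
  unfold pvPhi
  rw [pvLo_singleton, pvHi_singleton,
    pvSumIcoConst (v := h) _ (by omega) (fun x hx1 hx2 => by
      have hxp : x = p := by omega
      subst hxp
      simp [pvRoof, pvLmax, pvRmax, pvMaxD])]
  ring

theorem pvLmax_append_le {P : List (Int × Int)} {m : Int × Int} {x : Int}
    (hh : ∀ r ∈ P, m.2 ≤ r.2) {r0 : Int × Int} (h0 : r0 ∈ P) (h0x : r0.1 ≤ x) :
    pvLmax (P ++ [m]) x = pvLmax P x := by
  unfold pvLmax
  apply pvMaxD_eq_of
  · exact List.ne_nil_of_mem (pvMemL.mpr ⟨r0, List.mem_append_left _ h0, h0x, rfl⟩)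
  · exact List.ne_nil_of_mem (pvMemL.mpr ⟨r0, h0, h0x, rfl⟩)
  · intro a ha
    obtain ⟨r, hr, hrx, hra⟩ := pvMemL.mp ha
    rcases List.mem_append.mp hr with h1 | h2
    · exact ⟨a, pvMemL.mpr ⟨r, h1, hrx, hra⟩, le_refl a⟩
    · have hrm : r = m := by simpa using h2
      subst hrm
      exact ⟨r0.2, pvMemL.mpr ⟨r0, h0, h0x, rfl⟩, by rw [← hra]; exact hh r0 h0⟩
  · intro a ha
    obtain ⟨r, hr, hrx, hra⟩ := pvMemL.mp ha
    exact ⟨a, pvMemL.mpr ⟨r, List.mem_append_left _ hr, hrx, hra⟩, le_refl a⟩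

theorem pvRmax_append_le {P : List (Int × Int)} {m : Int × Int} {x : Int}
    (hh : ∀ r ∈ P, m.2 ≤ r.2) {r0 : Int × Int} (h0 : r0 ∈ P) (h0x : x ≤ r0.1) :
    pvRmax (P ++ [m]) x = pvRmax P x := by
  unfold pvRmax
  apply pvMaxD_eq_of
  · exact List.ne_nil_of_mem (pvMemR.mpr ⟨r0, List.mem_append_left _ h0, h0x, rfl⟩)
  · exact List.ne_nil_of_mem (pvMemR.mpr ⟨r0, h0, h0x, rfl⟩)
  · intro a ha
    obtain ⟨r, hr, hrx, hra⟩ := pvMemR.mp ha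
    rcases List.mem_append.mp hr with h1 | h2
    · exact ⟨a, pvMemR.mpr ⟨r, h1, hrx, hra⟩, le_refl a⟩
    · have hrm : r = m := by simpa using h2
      subst hrm
      exact ⟨r0.2, pvMemR.mpr ⟨r0, h0, h0x, rfl⟩, by rw [← hra]; exact hh r0 h0⟩
  · intro a ha
    obtain ⟨r, hr, hrx, hra⟩ := pvMemR.mp ha
    exact ⟨a, pvMemR.mpr ⟨r, List.mem_append_left _ hr, hrx, hra⟩, le_refl a⟩

theorem pvLmax_append_skip {P : List (Int × Int)} {m : Int × Int} {x : Int} (hx : ¬ m.1 ≤ x) :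
    pvLmax (P ++ [m]) x = pvLmax P x := by
  unfold pvLmax
  rw [List.filter_append]
  simp [hx]

theorem pvRmax_append_skip {P : List (Int × Int)} {m : Int × Int} {x : Int} (hx : ¬ x ≤ m.1) :
    pvRmax (P ++ [m]) x = pvRmax P x := by
  unfold pvRmax
  rw [List.filter_append]
  simp [hx]

theorem pvLo_append_of_le {P : List (Int × Int)} {m : Int × Int} (hP : P ≠ []) (h : pvLo P ≤ m.1) :
    pvLo (P ++ [m]) = pvLo P := by
  obtain ⟨rl, hrl, hrle⟩ := pvLo_mem hP
  apply le_antisymm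
  · calc pvLo (P ++ [m]) ≤ rl.1 := pvLo_le (List.mem_append_left _ hrl)
      _ = pvLo P := hrle
  · apply pvLe_minD (by simp)
    intro a ha
    obtain ⟨r, hr, hra⟩ := List.mem_map.mp ha
    rcases List.mem_append.mp hr with h1 | h2
    · exact hra ▸ pvLo_le h1
    · have hrm : r = m := by simpa using h2
      subst hrm
      exact hra ▸ h

theorem pvHi_append_of_ge {P : List (Int × Int)} {m : Int × Int} (hP : P ≠ []) (h : m.1 ≤ pvHi P) :
    pvHi (P ++ [m]) = pvHi P := by
  obtain ⟨rh, hrh, hrhe⟩ := pvHi_mem hP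
  apply le_antisymm
  · apply pvMaxD_le (by simp)
    intro a ha
    obtain ⟨r, hr, hra⟩ := List.mem_map.mp ha
    rcases List.mem_append.mp hr with h1 | h2
    · exact hra ▸ pvLe_hi h1
    · have hrm : r = m := by simpa using h2
      subst hrm
      exact hra ▸ h
  · calc pvHi P = rh.1 := hrhe.symm
      _ ≤ pvHi (P ++ [m]) := pvLe_hi (List.mem_append_left _ hrh)

theorem pvLo_append_lt {P : List (Int × Int)} {m : Int × Int} (hall : ∀ r ∈ P, m.1 ≤ r.1) :
    pvLo (P ++ [m]) = m.1 := by
  apply le_antisymm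
  · exact pvLo_le (List.mem_append_right _ (by simp))
  · apply pvLe_minD (by simp)
    intro a ha
    obtain ⟨r, hr, hra⟩ := List.mem_map.mp ha
    rcases List.mem_append.mp hr with h1 | h2
    · exact hra ▸ hall r h1
    · have hrm : r = m := by simpa using h2
      subst hrm
      exact le_of_eq hra

theorem pvHi_append_gt {P : List (Int × Int)} {m : Int × Int} (hall : ∀ r ∈ P, r.1 ≤ m.1) :
    pvHi (P ++ [m]) = m.1 := by
  apply le_antisymm
  · apply pvMaxD_le (by simp)
    intro a ha
    obtain ⟨r, hr, hra⟩ := List.mem_map.mp ha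
    rcases List.mem_append.mp hr with h1 | h2
    · exact hra ▸ hall r h1
    · have hrm : r = m := by simpa using h2
      subst hrm
      exact le_of_eq hra.symm
  · exact pvLe_hi (List.mem_append_right _ (by simp))

-- appending a pillar no taller than any present, with position inside [lo, hi]
theorem pvPhi_mid {P : List (Int × Int)} {m : Int × Int} (hP : P ≠ [])
    (hh : ∀ r ∈ P, m.2 ≤ r.2) (hlo : pvLo P ≤ m.1) (hhi : m.1 ≤ pvHi P) :
    pvPhi (P ++ [m]) = pvPhi P ∧ pvLo (P ++ [m]) = pvLo P ∧ pvHi (P ++ [m]) = pvHi P := by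
  obtain ⟨rl, hrl, hrle⟩ := pvLo_mem hP
  obtain ⟨rh, hrh, hrhe⟩ := pvHi_mem hP
  have hloeq := pvLo_append_of_le hP hlo
  have hhieq := pvHi_append_of_ge hP hhi
  refine ⟨?_, hloeq, hhieq⟩
  unfold pvPhi
  rw [hloeq, hhieq]
  apply Finset.sum_congr rfl
  intro x hx
  rw [Finset.mem_Ico] at hx
  unfold pvRoof
  rw [pvLmax_append_le hh hrl (by omega), pvRmax_append_le hh hrh (by omega)]
-- appending a pillar no taller than any present, strictly left of all of them
theorem pvPhi_left {P : List (Int × Int)} {m : Int × Int} (hP : P ≠ [])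
    (hh : ∀ r ∈ P, m.2 ≤ r.2) (hlt : m.1 < pvLo P) :
    pvPhi (P ++ [m]) = pvPhi P + (pvLo P - m.1) * m.2 ∧ pvLo (P ++ [m]) = m.1 ∧ pvHi (P ++ [m]) = pvHi P := by
  obtain ⟨rl, hrl, hrle⟩ := pvLo_mem hP
  obtain ⟨rh, hrh, hrhe⟩ := pvHi_mem hP
  have hall : ∀ r ∈ P, m.1 ≤ r.1 := fun r hr => by have := pvLo_le hr; omega
  have hloeq := pvLo_append_lt hall
  have hhieq : pvHi (P ++ [m]) = pvHi P := pvHi_append_of_ge hP (by have := pvLe_hi hrl; omega)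
  refine ⟨?_, hloeq, hhieq⟩
  unfold pvPhi
  rw [hloeq, hhieq]
  have hlohi : pvLo P ≤ pvHi P := by have := pvLe_hi hrl; omega
  rw [pvSumIcoSplit _ (le_of_lt hlt) (by omega)]
  have h1 : ∑ x ∈ Finset.Ico m.1 (pvLo P), pvRoof (P ++ [m]) x = (pvLo P - m.1) * m.2 := by
    apply pvSumIcoConst _ (le_of_lt hlt)
    intro x hx1 hx2
    unfold pvRoof
    have hlm : pvLmax (P ++ [m]) x = m.2 := by
      apply le_antisymm
      · apply pvMaxD_le (List.ne_nil_of_mem (pvMemL.mpr ⟨m, List.mem_append_right _ (by simp), hx1, rfl⟩))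
        intro a ha
        obtain ⟨r, hr, hrx, hra⟩ := pvMemL.mp ha
        rcases List.mem_append.mp hr with h1 | h2
        · have := pvLo_le h1; omega
        · have hrm : r = m := by simpa using h2
          subst hrm
          exact le_of_eq hra.symm
      · exact pvLe_lmax (List.mem_append_right _ (by simp)) hx1
    have hrm : m.2 ≤ pvRmax (P ++ [m]) x := by
      have h2 : x ≤ rl.1 := by omega
      exact le_trans (hh rl hrl) (pvLe_rmax (List.mem_append_left _ hrl) h2)
    rw [hlm]
    exact min_eq_left hrm
  have h2 : ∑ x ∈ Finset.Ico (pvLo P) (pvHi P + 1), pvRoof (P ++ [m]) x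
      = ∑ x ∈ Finset.Ico (pvLo P) (pvHi P + 1), pvRoof P x := by
    apply Finset.sum_congr rfl
    intro x hx
    rw [Finset.mem_Ico] at hx
    unfold pvRoof
    rw [pvLmax_append_le hh hrl (by omega), pvRmax_append_skip (by omega)]
  rw [h1, h2]
  ring
-- appending a pillar no taller than any present, strictly right of all of them
theorem pvPhi_right {P : List (Int × Int)} {m : Int × Int} (hP : P ≠ [])
    (hh : ∀ r ∈ P, m.2 ≤ r.2) (hgt : pvHi P < m.1) :
    pvPhi (P ++ [m]) = pvPhi P + (m.1 - pvHi P) * m.2 ∧ pvLo (P ++ [m]) = pvLo P ∧ pvHi (P ++ [m]) = m.1 := by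
  obtain ⟨rl, hrl, hrle⟩ := pvLo_mem hP
  obtain ⟨rh, hrh, hrhe⟩ := pvHi_mem hP
  have hall : ∀ r ∈ P, r.1 ≤ m.1 := fun r hr => by have := pvLe_hi hr; omega
  have hhieq := pvHi_append_gt hall
  have hloeq : pvLo (P ++ [m]) = pvLo P := pvLo_append_of_le hP (by have := pvLo_le hrh; omega)
  refine ⟨?_, hloeq, hhieq⟩
  unfold pvPhi
  rw [hloeq, hhieq]
  have hlohi : pvLo P ≤ pvHi P := by have := pvLe_hi hrl; omega
  rw [pvSumIcoSplit (fun x => pvRoof (P ++ [m]) x) (b := pvHi P + 1) (by omega) (by omega)]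
  have h1 : ∑ x ∈ Finset.Ico (pvHi P + 1) (m.1 + 1), pvRoof (P ++ [m]) x = (m.1 - pvHi P) * m.2 := by
    rw [pvSumIcoConst _ (by omega)
      (fun x hx1 hx2 => by
        unfold pvRoof
        have hrm : pvRmax (P ++ [m]) x = m.2 := by
          apply le_antisymm
          · apply pvMaxD_le (List.ne_nil_of_mem (pvMemR.mpr ⟨m, List.mem_append_right _ (by simp), by omega, rfl⟩))
            intro a ha
            obtain ⟨r, hr, hrx, hra⟩ := pvMemR.mp ha
            rcases List.mem_append.mp hr with h1 | h2
            · have := pvLe_hi h1; omega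
            · have hrm2 : r = m := by simpa using h2
              subst hrm2
              exact le_of_eq hra.symm
          · exact pvLe_rmax (List.mem_append_right _ (by simp)) (by omega)
        have hlm : m.2 ≤ pvLmax (P ++ [m]) x := by
          have h2 : rh.1 ≤ x := by omega
          exact le_trans (hh rh hrh) (pvLe_lmax (List.mem_append_left _ hrh) h2)
        rw [hrm]
        exact min_eq_right hlm)]
    ring
  have h2 : ∑ x ∈ Finset.Ico (pvLo P) (pvHi P + 1), pvRoof (P ++ [m]) x
      = ∑ x ∈ Finset.Ico (pvLo P) (pvHi P + 1), pvRoof P x := by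
    apply Finset.sum_congr rfl
    intro x hx
    rw [Finset.mem_Ico] at hx
    unfold pvRoof
    rw [pvLmax_append_skip (by omega), pvRmax_append_le hh hrh (by omega)]
  rw [h1, h2]

-- ---- side A: the heap loop computes pvPhi ----
theorem pvKeyLt_iff {z w : Int × Int} :
    pvKeyLt z w = true ↔ (z.1 < w.1 ∨ (z.1 = w.1 ∧ z.2 < w.2)) := by
  simp [pvKeyLt]

theorem pvKeyLt_false_iff {z w : Int × Int} :
    pvKeyLt z w = false ↔ ¬(z.1 < w.1 ∨ (z.1 = w.1 ∧ z.2 < w.2)) := by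
  rw [← pvKeyLt_iff, Bool.eq_false_iff]

theorem pvKeyLt_trans {a b c : Int × Int} (h1 : pvKeyLt a b = true) (h2 : pvKeyLt b c = true) :
    pvKeyLt a c = true := by
  rw [pvKeyLt_iff] at h1 h2 ⊢
  omega

theorem pvKeyLt_false_trans {a b c : Int × Int} (h1 : pvKeyLt a b = false) (h2 : pvKeyLt b c = false) :
    pvKeyLt a c = false := by
  rw [pvKeyLt_false_iff] at h1 h2 ⊢
  omega

theorem pvSelMin_cons_lt {m y : Int × Int} {t : List (Int × Int)} (h : pvKeyLt y m = true) :
    pvSelMin m (y :: t) = ((pvSelMin y t).1, m :: (pvSelMin y t).2) := by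
  simp [pvSelMin, h]

theorem pvSelMin_cons_ge {m y : Int × Int} {t : List (Int × Int)} (h : ¬ pvKeyLt y m = true) :
    pvSelMin m (y :: t) = ((pvSelMin m t).1, y :: (pvSelMin m t).2) := by
  simp [pvSelMin, h]

theorem pvSelMin_perm (m : Int × Int) (ys : List (Int × Int)) :
    ((pvSelMin m ys).1 :: (pvSelMin m ys).2).Perm (m :: ys) := by
  induction ys generalizing m with
  | nil => simp [pvSelMin]
  | cons y t ih =>
    by_cases hk : pvKeyLt y m = true
    · rw [pvSelMin_cons_lt hk]
      exact (List.Perm.swap m (pvSelMin y t).1 (pvSelMin y t).2).trans ((ih y).cons m)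
    · rw [pvSelMin_cons_ge hk]
      exact ((List.Perm.swap y (pvSelMin m t).1 (pvSelMin m t).2).trans ((ih m).cons y)).trans
        (List.Perm.swap m y t)
theorem pvSelMin_min (m : Int × Int) (ys : List (Int × Int)) :
    ∀ z ∈ m :: ys, pvKeyLt z (pvSelMin m ys).1 = false := by
  induction ys generalizing m with
  | nil =>
    intro z hz
    have hzm : z = m := by simpa using hz
    rw [hzm, show (pvSelMin m []).1 = m from rfl, pvKeyLt_false_iff]
    omega
  | cons y t ih =>
    intro z hz
    by_cases hk : pvKeyLt y m = true
    · rw [pvSelMin_cons_lt hk]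
      rcases List.mem_cons.mp hz with hzm | hz2
      · rw [hzm]
        cases hmr : pvKeyLt m (pvSelMin y t).1 with
        | false => rfl
        | true =>
          have hyy : pvKeyLt y (pvSelMin y t).1 = true := pvKeyLt_trans hk hmr
          have := ih y y (by simp)
          rw [this] at hyy
          exact absurd hyy (by simp)
      · exact ih y z hz2
    · have hk' : pvKeyLt y m = false := by simpa using hk
      rw [pvSelMin_cons_ge hk]
      rcases List.mem_cons.mp hz with hzm | hz2
      · rw [hzm]
        exact ih m m (by simp)
      · rcases List.mem_cons.mp hz2 with hzy | hzt
        · rw [hzy]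
          exact pvKeyLt_false_trans hk' (ih m m (by simp))
        · exact ih m z (by simp [hzt])
theorem pvKeyLt_false_fst {z w : Int × Int} (h : pvKeyLt z w = false) : w.1 ≤ z.1 := by
  rw [pvKeyLt_false_iff] at h
  omega

theorem pvLoopA_cons (y : Int × Int) (ys : List (Int × Int)) (area cl cr : Int) :
    pvLoopA (y :: ys) area cl cr =
      (if (pvSelMin y ys).1.2 < cl then
        pvLoopA (pvSelMin y ys).2 (area + (cl - (pvSelMin y ys).1.2) * (-(pvSelMin y ys).1.1)) (pvSelMin y ys).1.2 cr
      else if (pvSelMin y ys).1.2 > cr then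
        pvLoopA (pvSelMin y ys).2 (area + ((pvSelMin y ys).1.2 - cr) * (-(pvSelMin y ys).1.1)) cl (pvSelMin y ys).1.2
      else pvLoopA (pvSelMin y ys).2 area cl cr) := by
  rw [pvLoopA]

theorem pvLoopA_phi : ∀ (n : Nat) (heap done : List (Int × Int)), heap.length = n → done ≠ [] →
    (∀ q ∈ heap, ∀ r ∈ done, -q.1 ≤ r.2) →
    pvLoopA heap (pvPhi done) (pvLo done) (pvHi done)
      = pvPhi (done ++ heap.map (fun q => (q.2, -q.1))) := by
  intro n
  induction n with
  | zero =>
    intro heap done hlen hne hh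
    have hnil : heap = [] := List.length_eq_zero_iff.mp hlen
    subst hnil
    simp [pvLoopA]
  | succ k ih =>
    intro heap done hlen hne hh
    cases heap with
    | nil => simp at hlen
    | cons y ys =>
      have hperm := pvSelMin_perm y ys
      have hmin := pvSelMin_min y ys
      have hmem : (pvSelMin y ys).1 ∈ y :: ys := hperm.mem_iff.mp (by simp)
      have hrestlen : (pvSelMin y ys).2.length = k := by
        have h1 := pvSelMin_len y ys
        simp at hlen
        omega
      have hrestmem : ∀ q ∈ (pvSelMin y ys).2, q ∈ y :: ys :=
        fun q hq => hperm.mem_iff.mp (by simp [hq])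
      have hrestmin : ∀ q ∈ (pvSelMin y ys).2, (pvSelMin y ys).1.1 ≤ q.1 :=
        fun q hq => pvKeyLt_false_fst (hmin q (hrestmem q hq))
      have hmm : ((pvSelMin y ys).1.2, -(pvSelMin y ys).1.1) ∈
          ((pvSelMin y ys).1 :: (pvSelMin y ys).2).map (fun q => (q.2, -q.1)) := by simp
      have hfin : (done ++ [((pvSelMin y ys).1.2, -(pvSelMin y ys).1.1)])
            ++ (pvSelMin y ys).2.map (fun q => (q.2, -q.1))
          = done ++ ((pvSelMin y ys).1 :: (pvSelMin y ys).2).map (fun q => (q.2, -q.1)) := by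
        simp
      have hpermfin : (done ++ ((pvSelMin y ys).1 :: (pvSelMin y ys).2).map (fun q => (q.2, -q.1))).Perm
          (done ++ (y :: ys).map (fun q => (q.2, -q.1))) :=
        (hperm.map (fun q => (q.2, -q.1))).append_left done
      have hhh : ∀ r ∈ done, -(pvSelMin y ys).1.1 ≤ r.2 := fun r hr => hh _ hmem r hr
      have hnext : ∀ q ∈ (pvSelMin y ys).2,
          ∀ r ∈ done ++ [((pvSelMin y ys).1.2, -(pvSelMin y ys).1.1)], -q.1 ≤ r.2 := by
        intro q hq r hr
        rcases List.mem_append.mp hr with h1 | h2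
        · exact hh q (hrestmem q hq) r h1
        · have hrm : r = ((pvSelMin y ys).1.2, -(pvSelMin y ys).1.1) := by simpa using h2
          subst hrm
          have := hrestmin q hq
          simp
          omega
      have hinst := ih (pvSelMin y ys).2 (done ++ [((pvSelMin y ys).1.2, -(pvSelMin y ys).1.1)])
        hrestlen (by simp) hnext
      rw [hfin] at hinst
      rw [pvLoopA_cons]
      by_cases hc1 : (pvSelMin y ys).1.2 < pvLo done
      · obtain ⟨hphi, hlo, hhi⟩ := pvPhi_left (m := ((pvSelMin y ys).1.2, -(pvSelMin y ys).1.1)) hne hhh hc1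
        rw [hphi, hlo, hhi] at hinst
        rw [if_pos hc1]
        exact hinst.trans (pvPhi_perm hpermfin)
      · by_cases hc2 : (pvSelMin y ys).1.2 > pvHi done
        · obtain ⟨hphi, hlo, hhi⟩ := pvPhi_right (m := ((pvSelMin y ys).1.2, -(pvSelMin y ys).1.1)) hne hhh hc2
          rw [hphi, hlo, hhi] at hinst
          rw [if_neg hc1, if_pos hc2]
          exact hinst.trans (pvPhi_perm hpermfin)
        · obtain ⟨hphi, hlo, hhi⟩ := pvPhi_mid (m := ((pvSelMin y ys).1.2, -(pvSelMin y ys).1.1)) hne hhh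
            (by show pvLo done ≤ (pvSelMin y ys).1.2; omega)
            (by show (pvSelMin y ys).1.2 ≤ pvHi done; omega)
          rw [hphi, hlo, hhi] at hinst
          rw [if_neg hc1, if_neg hc2]
          exact hinst.trans (pvPhi_perm hpermfin)

theorem pvA_eq_phi {pillars : List (Int × Int)} (h : pillars ≠ []) :
    figure_out_area pillars = pvPhi pillars := by
  cases pillars with
  | nil => exact absurd rfl h
  | cons a t =>
    have hexp : figure_out_area (a :: t)
        = pvLoopA (pvSelMin (-a.2, a.1) (t.map fun q => (-q.2, q.1))).2
            (-(pvSelMin (-a.2, a.1) (t.map fun q => (-q.2, q.1))).1.1)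
            (pvSelMin (-a.2, a.1) (t.map fun q => (-q.2, q.1))).1.2
            (pvSelMin (-a.2, a.1) (t.map fun q => (-q.2, q.1))).1.2 := by
      rfl
    rw [hexp]
    have hperm := pvSelMin_perm ((-a.2 : Int), a.1) (t.map fun q => (-q.2, q.1))
    have hmin := pvSelMin_min ((-a.2 : Int), a.1) (t.map fun q => (-q.2, q.1))
    have hlen := pvSelMin_len ((-a.2 : Int), a.1) (t.map fun q => (-q.2, q.1))
    have hstart : ∀ q ∈ (pvSelMin ((-a.2 : Int), a.1) (t.map fun q => (-q.2, q.1))).2,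
        ∀ r ∈ [((pvSelMin ((-a.2 : Int), a.1) (t.map fun q => (-q.2, q.1))).1.2,
                -(pvSelMin ((-a.2 : Int), a.1) (t.map fun q => (-q.2, q.1))).1.1)], -q.1 ≤ r.2 := by
      intro q hq r hr
      have hrm := List.mem_singleton.mp hr
      subst hrm
      have hqmem : q ∈ ((-a.2 : Int), a.1) :: t.map (fun q => (-q.2, q.1)) :=
        hperm.mem_iff.mp (by simp [hq])
      have := pvKeyLt_false_fst (hmin q hqmem)
      simp
      omega
    have h1 := pvPhi_singleton (pvSelMin ((-a.2 : Int), a.1) (t.map fun q => (-q.2, q.1))).1.2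
      (-(pvSelMin ((-a.2 : Int), a.1) (t.map fun q => (-q.2, q.1))).1.1)
    have h2 := pvLo_singleton (pvSelMin ((-a.2 : Int), a.1) (t.map fun q => (-q.2, q.1))).1.2
      (-(pvSelMin ((-a.2 : Int), a.1) (t.map fun q => (-q.2, q.1))).1.1)
    have h3 := pvHi_singleton (pvSelMin ((-a.2 : Int), a.1) (t.map fun q => (-q.2, q.1))).1.2
      (-(pvSelMin ((-a.2 : Int), a.1) (t.map fun q => (-q.2, q.1))).1.1)
    have hinst := pvLoopA_phi ((pvSelMin ((-a.2 : Int), a.1) (t.map fun q => (-q.2, q.1))).2.length)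
      (pvSelMin ((-a.2 : Int), a.1) (t.map fun q => (-q.2, q.1))).2
      [((pvSelMin ((-a.2 : Int), a.1) (t.map fun q => (-q.2, q.1))).1.2,
        -(pvSelMin ((-a.2 : Int), a.1) (t.map fun q => (-q.2, q.1))).1.1)]
      rfl (by simp) hstart
    rw [h1, h2, h3] at hinst
    have hfin : ([((pvSelMin ((-a.2 : Int), a.1) (t.map fun q => (-q.2, q.1))).1.2,
            -(pvSelMin ((-a.2 : Int), a.1) (t.map fun q => (-q.2, q.1))).1.1)])
          ++ (pvSelMin ((-a.2 : Int), a.1) (t.map fun q => (-q.2, q.1))).2.map (fun q => (q.2, -q.1))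
        = ((pvSelMin ((-a.2 : Int), a.1) (t.map fun q => (-q.2, q.1))).1
            :: (pvSelMin ((-a.2 : Int), a.1) (t.map fun q => (-q.2, q.1))).2).map (fun q => (q.2, -q.1)) := by
      simp
    rw [hfin] at hinst
    have hmaps : ((((-a.2 : Int), a.1) :: t.map (fun q => (-q.2, q.1))).map (fun q => (q.2, -q.1))) = a :: t := by
      have hid : ∀ q ∈ t, ((fun q : Int × Int => (q.2, -q.1)) ∘ fun q : Int × Int => (-q.2, q.1)) q = id q := by
        intro q hq
        simp [Function.comp]
      rw [List.map_cons, List.map_map, List.map_congr_left hid, List.map_id]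
      simp
    refine hinst.trans ?_
    calc pvPhi (((pvSelMin ((-a.2 : Int), a.1) (t.map fun q => (-q.2, q.1))).1
            :: (pvSelMin ((-a.2 : Int), a.1) (t.map fun q => (-q.2, q.1))).2).map (fun q => (q.2, -q.1)))
        = pvPhi (((((-a.2 : Int), a.1) :: t.map (fun q => (-q.2, q.1))).map (fun q => (q.2, -q.1)))) :=
          pvPhi_perm (hperm.map _)
      _ = pvPhi (a :: t) := by rw [hmaps]

-- ---- side B: the dict + sorted sweep computes pvPhi ----
def pvMaxAt (ps : List (Int × Int)) (k : Int) : Int :=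
  pvMaxD ((ps.filter (fun q => decide (q.1 = k))).map Prod.snd)

theorem pvBestF_get (ps : List (Int × Int)) (d : PySem.Dict Int Int) (k : Int) :
    (ps.foldl
      (fun d q =>
        match PySem.Dict.get? d q.1 with
        | none => PySem.Dict.insert d q.1 q.2
        | some v => if q.2 > v then PySem.Dict.insert d q.1 q.2 else d) d).get? k =
      ((ps.filter (fun q => decide (q.1 = k))).map Prod.snd).foldl
        (fun o h => some (o.elim h (fun v => max v h))) (d.get? k) := by
  induction ps generalizing d with
  | nil => rfl
  | cons q t ih =>
    rw [List.foldl_cons, ih]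
    by_cases hk : q.1 = k
    · subst hk
      rw [List.filter_cons_of_pos (by simp), List.map_cons, List.foldl_cons]
      congr 1
      cases hg : d.get? q.1 with
      | none =>
        show (d.insert q.1 q.2).get? q.1 = some (Option.elim none q.2 (fun v => max v q.2))
        rw [PySem.Dict.get?_insert_self]
        rfl
      | some v =>
        show (if q.2 > v then d.insert q.1 q.2 else d).get? q.1
            = some (Option.elim (some v) q.2 (fun v => max v q.2))
        by_cases hv : q.2 > v
        · rw [if_pos hv, PySem.Dict.get?_insert_self]
          simp [Option.elim, max_eq_right (le_of_lt hv)]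
        · rw [if_neg hv, hg]
          simp [Option.elim, max_eq_left (not_lt.mp hv)]
    · rw [List.filter_cons_of_neg (by simpa using hk)]
      congr 1
      cases hg : d.get? q.1 with
      | none =>
        show (d.insert q.1 q.2).get? k = d.get? k
        rw [PySem.Dict.get?_insert, if_neg (Ne.symm hk)]
      | some v =>
        show (if q.2 > v then d.insert q.1 q.2 else d).get? k = d.get? k
        by_cases hv : q.2 > v
        · rw [if_pos hv, PySem.Dict.get?_insert, if_neg (Ne.symm hk)]
        · rw [if_neg hv]

theorem pvFoldOmax_some (l : List Int) : ∀ v : Int,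
    l.foldl (fun o h => some (o.elim h (fun v => max v h))) (some v) = some (l.foldl max v) := by
  induction l with
  | nil => intro v; rfl
  | cons a t ih => intro v; rw [List.foldl_cons, List.foldl_cons]; exact ih (max v a)

theorem pvMaxD_foldl (t : List Int) : ∀ v : Int, t.foldl max v = pvMaxD (v :: t) := by
  induction t with
  | nil =>
    intro v
    simp [pvMaxD]
  | cons a t' ih =>
    intro v
    rw [List.foldl_cons, ih]
    apply le_antisymm
    · apply pvMaxD_le (by simp)
      intro b hb
      rcases List.mem_cons.mp hb with h1 | h2
      · rw [h1]
        exact max_le (pvLe_maxD (by simp)) (pvLe_maxD (by simp))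
      · exact pvLe_maxD (by simp [h2])
    · apply pvMaxD_le (by simp)
      intro b hb
      rcases List.mem_cons.mp hb with h1 | h2
      · rw [h1]
        exact le_trans (le_max_left v a) (pvLe_maxD (by simp))
      · rcases List.mem_cons.mp h2 with h3 | h4
        · rw [h3]
          exact le_trans (le_max_right v a) (pvLe_maxD (by simp))
        · exact pvLe_maxD (by simp [h4])

theorem pvMaxD_cons_ne {sl : List Int} (h : sl ≠ []) (r : Int) : pvMaxD (r :: sl) = max r (pvMaxD sl) := by
  apply le_antisymm
  · apply pvMaxD_le (by simp)
    intro b hb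
    rcases List.mem_cons.mp hb with h1 | h2
    · rw [h1]; exact le_max_left _ _
    · exact le_trans (pvLe_maxD h2) (le_max_right _ _)
  · exact max_le (pvLe_maxD (by simp)) (pvMaxD_le h (fun b hb => pvLe_maxD (by simp [hb])))
theorem pvBestF_nodup (ps : List (Int × Int)) : ∀ (d : PySem.Dict Int Int), d.keys.Nodup →
    (ps.foldl
      (fun d q =>
        match PySem.Dict.get? d q.1 with
        | none => PySem.Dict.insert d q.1 q.2
        | some v => if q.2 > v then PySem.Dict.insert d q.1 q.2 else d) d).keys.Nodup := by
  induction ps with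
  | nil => intro d hd; exact hd
  | cons q t ih =>
    intro d hd
    rw [List.foldl_cons]
    apply ih
    cases hg : d.get? q.1 with
    | none =>
      show (d.insert q.1 q.2).keys.Nodup
      apply PySem.Dict.nodup_keys_insert
      exact hd
    | some v =>
      show (if q.2 > v then d.insert q.1 q.2 else d).keys.Nodup
      by_cases hv : q.2 > v
      · rw [if_pos hv]
        apply PySem.Dict.nodup_keys_insert
        exact hd
      · rw [if_neg hv]
        exact hd

theorem pvBest_nodup (ps : List (Int × Int)) : (pvBest ps).keys.Nodup := by
  unfold pvBest
  exact pvBestF_nodup ps PySem.Dict.empty (by simp [PySem.Dict.keys_empty])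
theorem pvBest_get?_eq (ps : List (Int × Int)) (k : Int) :
    (pvBest ps).get? k = if k ∈ ps.map Prod.fst then some (pvMaxAt ps k) else none := by
  unfold pvBest
  rw [pvBestF_get, PySem.Dict.get?_empty]
  cases hf : (ps.filter (fun q => decide (q.1 = k))).map Prod.snd with
  | nil =>
    have hnk : k ∉ ps.map Prod.fst := by
      intro hk
      obtain ⟨r, hr, hreq⟩ := List.mem_map.mp hk
      have hm : r.2 ∈ (ps.filter (fun q => decide (q.1 = k))).map Prod.snd :=
        pvMemE.mpr ⟨r, hr, hreq, rfl⟩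
      rw [hf] at hm
      simp at hm
    simp [hnk]
  | cons h0 t0 =>
    rw [List.foldl_cons]
    have hk : k ∈ ps.map Prod.fst := by
      have hm : h0 ∈ (ps.filter (fun q => decide (q.1 = k))).map Prod.snd := by rw [hf]; simp
      obtain ⟨r, hr, hrk, hrv⟩ := pvMemE.mp hm
      exact List.mem_map.mpr ⟨r, hr, hrk⟩
    rw [if_pos hk]
    show List.foldl (fun o h => some (o.elim h (fun v => max v h))) (some h0) t0 = some (pvMaxAt ps k)
    rw [pvFoldOmax_some, pvMaxD_foldl]
    unfold pvMaxAt
    rw [hf]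

-- mem characterisation of the sorted column list
theorem pvCols_mem (ps : List (Int × Int)) (q : Int × Int) :
    q ∈ PySem.List.sorted (pvBest ps).items Prod.fst false ↔
      (q.1 ∈ ps.map Prod.fst ∧ q.2 = pvMaxAt ps q.1) := by
  rw [PySem.List.mem_sorted]
  have hnd := pvBest_nodup ps
  constructor
  · intro hq
    have hg : (pvBest ps).get? q.1 = some q.2 :=
      PySem.Dict.get?_of_mem_items _ (by simpa using hq) hnd
    rw [pvBest_get?_eq] at hg
    by_cases hk : q.1 ∈ ps.map Prod.fst
    · rw [if_pos hk] at hg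
      exact ⟨hk, (Option.some.inj hg).symm⟩
    · rw [if_neg hk] at hg
      cases hg
  · rintro ⟨hk, hv⟩
    have hg : (pvBest ps).get? q.1 = some q.2 := by
      rw [pvBest_get?_eq, if_pos hk, hv]
    have hm := PySem.Dict.mem_items_of_get?_eq_some _ hg
    simpa using hm
theorem pvPairwise_ne_of_nodup_map {l : List (Int × Int)} (h : (l.map Prod.fst).Nodup) :
    l.Pairwise (fun a b => a.1 ≠ b.1) := by
  induction l with
  | nil => simp
  | cons a t ih =>
    rw [List.map_cons, List.nodup_cons] at h
    refine List.Pairwise.cons ?_ (ih h.2)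
    intro b hb heq
    exact h.1 (heq ▸ List.mem_map_of_mem (f := Prod.fst) hb)

theorem pvCols_sorted (ps : List (Int × Int)) :
    (PySem.List.sorted (pvBest ps).items Prod.fst false).Pairwise (fun a b => a.1 < b.1) := by
  have h1 : (PySem.List.sorted (pvBest ps).items Prod.fst false).Pairwise
      (fun a b => a.1 ≤ b.1) := PySem.List.sorted_pairwise _ _
  have hperm : (PySem.List.sorted (pvBest ps).items Prod.fst false).Perm (pvBest ps).items :=
    PySem.List.sorted_perm _ _ _
  have hkeys : (pvBest ps).keys = (pvBest ps).items.map Prod.fst := by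
    simp only [PySem.Dict.keys]
  have hnd : ((PySem.List.sorted (pvBest ps).items Prod.fst false).map Prod.fst).Nodup := by
    have h2 := pvBest_nodup ps
    rw [hkeys] at h2
    exact ((hperm.map Prod.fst).nodup_iff).mpr h2
  exact (h1.and (pvPairwise_ne_of_nodup_map hnd)).imp
    (fun hab => lt_of_le_of_ne hab.1 hab.2)
theorem pvCols_ne (ps : List (Int × Int)) (h : ps ≠ []) :
    PySem.List.sorted (pvBest ps).items Prod.fst false ≠ [] := by
  cases ps with
  | nil => exact absurd rfl h
  | cons a t =>
    intro hnil
    have hk : a.1 ∈ (a :: t).map Prod.fst := by simp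
    have hmem : ((a.1, pvMaxAt (a :: t) a.1) : Int × Int)
        ∈ PySem.List.sorted (pvBest (a :: t)).items Prod.fst false :=
      (pvCols_mem (a :: t) _).mpr ⟨hk, rfl⟩
    rw [hnil] at hmem
    simp at hmem

theorem pvCols_elem_src {ps : List (Int × Int)} {q : Int × Int}
    (hq : q ∈ PySem.List.sorted (pvBest ps).items Prod.fst false) :
    ∃ r ∈ ps, r.1 = q.1 ∧ r.2 = q.2 := by
  obtain ⟨hk, hv⟩ := (pvCols_mem ps q).mp hq
  have hne : (ps.filter (fun p => decide (p.1 = q.1))).map Prod.snd ≠ [] := by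
    obtain ⟨r, hr, hreq⟩ := List.mem_map.mp hk
    exact List.ne_nil_of_mem (pvMemE.mpr ⟨r, hr, hreq, rfl⟩)
  obtain ⟨r, hr, hrk, hrv⟩ := pvMemE.mp (pvMaxD_mem hne)
  exact ⟨r, hr, hrk, by rw [hrv, hv]; rfl⟩

theorem pvCols_elem_tgt {ps : List (Int × Int)} {r : Int × Int} (hr : r ∈ ps) :
    ∃ q ∈ PySem.List.sorted (pvBest ps).items Prod.fst false, q.1 = r.1 ∧ r.2 ≤ q.2 := by
  refine ⟨(r.1, pvMaxAt ps r.1),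
    (pvCols_mem ps _).mpr ⟨(List.mem_map_of_mem (f := Prod.fst) hr : r.1 ∈ ps.map Prod.fst), rfl⟩, rfl, ?_⟩
  exact pvLe_maxD (pvMemE.mpr ⟨r, hr, rfl, rfl⟩)

theorem pvPhi_dedup (ps : List (Int × Int)) (h : ps ≠ []) :
    pvPhi ps = pvPhi (PySem.List.sorted (pvBest ps).items Prod.fst false) := by
  have hCne := pvCols_ne ps h
  have hlo : pvLo ps = pvLo (PySem.List.sorted (pvBest ps).items Prod.fst false) := by
    apply pvMinD_eq_of (by simpa using h) (by simpa using hCne)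
    · intro a ha
      obtain ⟨r, hr, hra⟩ := List.mem_map.mp ha
      obtain ⟨q, hq, hq1, _⟩ := pvCols_elem_tgt hr
      exact ⟨q.1, List.mem_map_of_mem hq, by omega⟩
    · intro a ha
      obtain ⟨q, hq, hqa⟩ := List.mem_map.mp ha
      obtain ⟨r, hr, hr1, _⟩ := pvCols_elem_src hq
      exact ⟨r.1, List.mem_map_of_mem hr, by omega⟩
  have hhi : pvHi ps = pvHi (PySem.List.sorted (pvBest ps).items Prod.fst false) := by
    apply pvMaxD_eq_of (by simpa using h) (by simpa using hCne)
    · intro a ha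
      obtain ⟨r, hr, hra⟩ := List.mem_map.mp ha
      obtain ⟨q, hq, hq1, _⟩ := pvCols_elem_tgt hr
      exact ⟨q.1, List.mem_map_of_mem hq, by omega⟩
    · intro a ha
      obtain ⟨q, hq, hqa⟩ := List.mem_map.mp ha
      obtain ⟨r, hr, hr1, _⟩ := pvCols_elem_src hq
      exact ⟨r.1, List.mem_map_of_mem hr, by omega⟩
  obtain ⟨rl, hrl, hrle⟩ := pvLo_mem h
  unfold pvPhi
  rw [hlo, hhi]
  apply Finset.sum_congr rfl
  intro x hx
  rw [Finset.mem_Ico] at hx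
  rw [← hlo, ← hhi] at hx
  obtain ⟨rh, hrh, hrhe⟩ := pvHi_mem h
  have hlmax : pvLmax ps x = pvLmax (PySem.List.sorted (pvBest ps).items Prod.fst false) x := by
    apply pvMaxD_eq_of
    · exact List.ne_nil_of_mem (pvMemL.mpr ⟨rl, hrl, by omega, rfl⟩)
    · obtain ⟨q, hq, hq1, _⟩ := pvCols_elem_tgt hrl
      exact List.ne_nil_of_mem (pvMemL.mpr ⟨q, hq, by omega, rfl⟩)
    · intro a ha
      obtain ⟨r, hr, hrx, hra⟩ := pvMemL.mp ha
      obtain ⟨q, hq, hq1, hq2⟩ := pvCols_elem_tgt hr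
      exact ⟨q.2, pvMemL.mpr ⟨q, hq, by omega, rfl⟩, by omega⟩
    · intro a ha
      obtain ⟨q, hq, hqx, hqa⟩ := pvMemL.mp ha
      obtain ⟨r, hr, hr1, hr2⟩ := pvCols_elem_src hq
      exact ⟨a, pvMemL.mpr ⟨r, hr, by omega, by omega⟩, le_refl a⟩
  have hrmax : pvRmax ps x = pvRmax (PySem.List.sorted (pvBest ps).items Prod.fst false) x := by
    apply pvMaxD_eq_of
    · exact List.ne_nil_of_mem (pvMemR.mpr ⟨rh, hrh, by omega, rfl⟩)
    · obtain ⟨q, hq, hq1, _⟩ := pvCols_elem_tgt hrh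
      exact List.ne_nil_of_mem (pvMemR.mpr ⟨q, hq, by omega, rfl⟩)
    · intro a ha
      obtain ⟨r, hr, hrx, hra⟩ := pvMemR.mp ha
      obtain ⟨q, hq, hq1, hq2⟩ := pvCols_elem_tgt hr
      exact ⟨q.2, pvMemR.mpr ⟨q, hq, by omega, rfl⟩, by omega⟩
    · intro a ha
      obtain ⟨q, hq, hqx, hqa⟩ := pvMemR.mp ha
      obtain ⟨r, hr, hr1, hr2⟩ := pvCols_elem_src hq
      exact ⟨a, pvMemR.mpr ⟨r, hr, by omega, by omega⟩, le_refl a⟩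
  unfold pvRoof
  rw [hlmax, hrmax]

-- running maxima of the sweeps
theorem pvFoldlMaxSnd (l : List (Int × Int)) (r : Int) (h : l ≠ []) :
    l.foldl (fun acc q => max acc q.2) r = max r (pvMaxD (l.map Prod.snd)) := by
  rw [← List.foldl_map (f := Prod.snd) (g := max), pvMaxD_foldl,
    pvMaxD_cons_ne (by simpa using h)]

theorem pvFoldMax_comm (l : List (Int × Int)) : ∀ r a : Int,
    max (l.foldl (fun acc q => max acc q.2) r) a = l.foldl (fun acc q => max acc q.2) (max r a) := by
  induction l with
  | nil => intro r a; rfl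
  | cons q t ih =>
    intro r a
    rw [List.foldl_cons, List.foldl_cons, ih, max_right_comm]

theorem pvLmax_cons_le {c : Int × Int} {L : List (Int × Int)} {x : Int} (hc : c.1 ≤ x)
    {r0 : Int × Int} (h0 : r0 ∈ L) (h0x : r0.1 ≤ x) :
    pvLmax (c :: L) x = max c.2 (pvLmax L x) := by
  unfold pvLmax
  rw [List.filter_cons_of_pos (by simpa using hc), List.map_cons]
  exact pvMaxD_cons_ne (List.ne_nil_of_mem (pvMemL.mpr ⟨r0, h0, h0x, rfl⟩)) c.2

theorem pvRmax_cons_skip {c : Int × Int} {L : List (Int × Int)} {x : Int} (hc : ¬ x ≤ c.1) :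
    pvRmax (c :: L) x = pvRmax L x := by
  unfold pvRmax
  rw [List.filter_cons_of_neg (by simpa using hc)]

theorem pvLmax_cons_only {c : Int × Int} {L : List (Int × Int)} {x : Int} (hc : c.1 ≤ x)
    (hL : ∀ r ∈ L, ¬ r.1 ≤ x) :
    pvLmax (c :: L) x = c.2 := by
  unfold pvLmax
  rw [List.filter_cons_of_pos (by simpa using hc),
    List.filter_eq_nil_iff.mpr (fun r hr => by simpa using hL r hr)]
  simp [pvMaxD]

theorem pvRmax_all {L : List (Int × Int)} {x : Int} (h : ∀ r ∈ L, x ≤ r.1) :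
    pvRmax L x = pvMaxD (L.map Prod.snd) := by
  unfold pvRmax
  rw [List.filter_eq_self.mpr (fun r hr => by simpa using h r hr)]

theorem pvSorted_le_last : ∀ (l : List (Int × Int)) (hl : l ≠ []),
    l.Pairwise (fun a b => a.1 < b.1) → ∀ r ∈ l, r.1 ≤ (l.getLast hl).1 := by
  intro l
  induction l with
  | nil => intro hl; exact absurd rfl hl
  | cons c t ih =>
    intro hl hpw r hr
    cases t with
    | nil =>
      have hrc : r = c := by simpa using hr
      rw [hrc]
      simp [List.getLast]
    | cons d t' =>
      rw [List.getLast_cons (by simp)]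
      rcases List.mem_cons.mp hr with h1 | h2
      · have hcd : c.1 < d.1 := (List.pairwise_cons.mp hpw).1 d (by simp)
        have hdl := ih (by simp) (List.pairwise_cons.mp hpw).2 d (by simp)
        rw [h1]
        omega
      · exact ih (by simp) (List.pairwise_cons.mp hpw).2 r h2

theorem pvSweepL (l : List (Int × Int)) : ∀ (c : Int × Int) (run area : Int),
    (c :: l).Pairwise (fun a b => a.1 < b.1) →
    (((c :: l).zip l).foldl pvStepL (run, area)).2
      = area + ∑ x ∈ Finset.Ico c.1 ((c :: l).getLast (by simp)).1, max run (pvLmax (c :: l) x) := by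
  induction l with
  | nil => intro c run area hpw; simp [List.getLast]
  | cons d l' ih =>
    intro c run area hpw
    have hpw' : (d :: l').Pairwise (fun a b => a.1 < b.1) := (List.pairwise_cons.mp hpw).2
    have hcd : c.1 < d.1 := (List.pairwise_cons.mp hpw).1 d (by simp)
    have hge : ∀ r ∈ d :: l', d.1 ≤ r.1 := by
      intro r hr
      rcases List.mem_cons.mp hr with h1 | h2
      · rw [h1]
      · exact le_of_lt ((List.pairwise_cons.mp hpw').1 r h2)
    have hzip : ((c :: d :: l').zip (d :: l')) = (c, d) :: ((d :: l').zip l') := rfl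
    rw [hzip, List.foldl_cons,
      show pvStepL (run, area) (c, d) = (max run c.2, area + (d.1 - c.1) * max run c.2) from rfl,
      ih d (max run c.2) _ hpw']
    have hlast : ((d :: l').getLast (by simp)) = ((c :: d :: l').getLast (by simp)) :=
      (List.getLast_cons (by simp)).symm
    have hdl : d.1 ≤ ((c :: d :: l').getLast (by simp)).1 :=
      pvSorted_le_last (c :: d :: l') (by simp) hpw d (by simp)
    have hsum1 : ∑ x ∈ Finset.Ico c.1 d.1, max run (pvLmax (c :: d :: l') x)
        = (d.1 - c.1) * max run c.2 := by
      apply pvSumIcoConst _ (le_of_lt hcd)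
      intro x hx1 hx2
      rw [pvLmax_cons_only hx1 (fun r hr => by have := hge r hr; omega)]
    have hsum2 : ∑ x ∈ Finset.Ico d.1 ((c :: d :: l').getLast (by simp)).1, max run (pvLmax (c :: d :: l') x)
        = ∑ x ∈ Finset.Ico d.1 ((c :: d :: l').getLast (by simp)).1, max (max run c.2) (pvLmax (d :: l') x) := by
      apply Finset.sum_congr rfl
      intro x hx
      rw [Finset.mem_Ico] at hx
      rw [pvLmax_cons_le (by omega) (show d ∈ d :: l' by simp) (by omega), ← max_assoc]
    rw [hlast,
      pvSumIcoSplit (fun x => max run (pvLmax (c :: d :: l') x)) (le_of_lt hcd) hdl, hsum1, hsum2]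
    ring

theorem pvSweepR (l : List (Int × Int)) : ∀ (c : Int × Int) (run area : Int),
    (c :: l).Pairwise (fun a b => a.1 < b.1) →
    (((c :: l).zip l).reverse.foldl pvStepR (run, area))
      = (l.foldl (fun acc q => max acc q.2) run,
         area + ∑ x ∈ Finset.Ico (c.1 + 1) (((c :: l).getLast (by simp)).1 + 1), max run (pvRmax (c :: l) x)) := by
  induction l with
  | nil => intro c run area hpw; simp [List.getLast]
  | cons d l' ih =>
    intro c run area hpw
    have hpw' : (d :: l').Pairwise (fun a b => a.1 < b.1) := (List.pairwise_cons.mp hpw).2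
    have hcd : c.1 < d.1 := (List.pairwise_cons.mp hpw).1 d (by simp)
    have hge : ∀ r ∈ d :: l', d.1 ≤ r.1 := by
      intro r hr
      rcases List.mem_cons.mp hr with h1 | h2
      · rw [h1]
      · exact le_of_lt ((List.pairwise_cons.mp hpw').1 r h2)
    have hzip : ((c :: d :: l').zip (d :: l')) = (c, d) :: ((d :: l').zip l') := rfl
    rw [hzip, List.reverse_cons, List.foldl_append, ih d run area hpw',
      List.foldl_cons, List.foldl_nil]
    have hlast : ((d :: l').getLast (by simp)) = ((c :: d :: l').getLast (by simp)) :=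
      (List.getLast_cons (by simp)).symm
    have hrun : max (l'.foldl (fun acc q => max acc q.2) run) d.2
        = (d :: l').foldl (fun acc q => max acc q.2) run := by
      rw [pvFoldMax_comm, List.foldl_cons]
    have hrunval : (d :: l').foldl (fun acc q => max acc q.2) run
        = max run (pvMaxD ((d :: l').map Prod.snd)) := pvFoldlMaxSnd _ _ (by simp)
    have hdl : d.1 + 1 ≤ ((c :: d :: l').getLast (by simp)).1 + 1 := by
      have := pvSorted_le_last (c :: d :: l') (by simp) hpw d (by simp)
      omega
    have hsum1 : ∑ x ∈ Finset.Ico (c.1 + 1) (d.1 + 1), max run (pvRmax (c :: d :: l') x)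
        = (d.1 - c.1) * max run (pvMaxD ((d :: l').map Prod.snd)) := by
      rw [pvSumIcoConst (v := max run (pvMaxD ((d :: l').map Prod.snd))) _ (by omega)
        (fun x hx1 hx2 => by
          rw [pvRmax_cons_skip (by omega), pvRmax_all (fun r hr => by have := hge r hr; omega)])]
      ring
    have hsum2 : ∑ x ∈ Finset.Ico (d.1 + 1) (((c :: d :: l').getLast (by simp)).1 + 1),
          max run (pvRmax (c :: d :: l') x)
        = ∑ x ∈ Finset.Ico (d.1 + 1) (((c :: d :: l').getLast (by simp)).1 + 1),
          max run (pvRmax (d :: l') x) := by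
      apply Finset.sum_congr rfl
      intro x hx
      rw [Finset.mem_Ico] at hx
      rw [pvRmax_cons_skip (by omega)]
    show ((max (l'.foldl (fun acc q => max acc q.2) run) d.2,
        (area + ∑ x ∈ Finset.Ico (d.1 + 1) (((d :: l').getLast (by simp)).1 + 1), max run (pvRmax (d :: l') x))
          + (d.1 - c.1) * max (l'.foldl (fun acc q => max acc q.2) run) d.2) : Int × Int) = _
    rw [Prod.mk.injEq]
    refine ⟨hrun, ?_⟩
    rw [hlast,
      pvSumIcoSplit (fun x => max run (pvRmax (c :: d :: l') x)) (by omega) hdl,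
      hsum1, ← hsum2, hrun, hrunval]
    ring

theorem pvLmax_append_skip_all {L D : List (Int × Int)} {x : Int} (hD : ∀ b ∈ D, ¬ b.1 ≤ x) :
    pvLmax (L ++ D) x = pvLmax L x := by
  unfold pvLmax
  rw [List.filter_append,
    show D.filter (fun q => decide (q.1 ≤ x)) = [] from
      List.filter_eq_nil_iff.mpr (fun b hb => by simpa using hD b hb),
    List.append_nil]

theorem pvRmax_append_skip_all {L D : List (Int × Int)} {x : Int} (hL : ∀ b ∈ L, ¬ x ≤ b.1) :
    pvRmax (L ++ D) x = pvRmax D x := by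
  unfold pvRmax
  rw [List.filter_append,
    show L.filter (fun q => decide (x ≤ q.1)) = [] from
      List.filter_eq_nil_iff.mpr (fun b hb => by simpa using hL b hb),
    List.nil_append]

theorem pvLo_sorted_head' {l : List (Int × Int)} (hl : l ≠ [])
    (hpw : l.Pairwise (fun a b => a.1 < b.1)) : pvLo l = (l.head hl).1 := by
  cases l with
  | nil => exact absurd rfl hl
  | cons c t =>
    show pvLo (c :: t) = c.1
    apply le_antisymm (pvLo_le (by simp))
    apply pvLe_minD (by simp)
    intro a ha
    obtain ⟨r, hr, hra⟩ := List.mem_map.mp ha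
    rcases List.mem_cons.mp hr with h1 | h2
    · rw [← hra, h1]
    · have := (List.pairwise_cons.mp hpw).1 r h2
      omega

theorem pvHi_sorted_last {l : List (Int × Int)} (hl : l ≠ [])
    (hpw : l.Pairwise (fun a b => a.1 < b.1)) : pvHi l = (l.getLast hl).1 := by
  apply le_antisymm
  · apply pvMaxD_le (by simpa using hl)
    intro a ha
    obtain ⟨r, hr, hra⟩ := List.mem_map.mp ha
    have := pvSorted_le_last l hl hpw r hr
    omega
  · exact pvLe_hi (List.getLast_mem hl)

theorem pvGetLastD_cons : ∀ (l : List (Int × Int)) (a d : Int × Int),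
    (a :: l).getLastD d = (a :: l).getLast (by simp) := by
  intro l
  induction l with
  | nil => intro a d; rfl
  | cons b t ih =>
    intro a d
    rw [List.getLastD_cons, ih b a]
    exact ((List.getLast_cons (by simp)).symm :
      (b :: t).getLast (by simp) = (a :: b :: t).getLast (by simp))

theorem pvB_eq_phi {pillars : List (Int × Int)} (h : pillars ≠ []) :
    figure_out_area_alt pillars = pvPhi pillars := by
  rw [pvPhi_dedup pillars h]
  set C := PySem.List.sorted (pvBest pillars).items Prod.fst false with hC
  have hCne : C ≠ [] := pvCols_ne pillars h
  have hCpw : C.Pairwise (fun a b => a.1 < b.1) := pvCols_sorted pillars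
  obtain ⟨peakh, hpeak⟩ : ∃ v, PySem.List.max? (C.map Prod.snd) (fun y => y) = some v := by
    cases hm : PySem.List.max? (C.map Prod.snd) (fun y => y) with
    | none =>
      rw [PySem.List.max?_eq_none_iff] at hm
      exact absurd hm (by simpa using hCne)
    | some v => exact ⟨v, rfl⟩
  have hpeakmem : peakh ∈ C.map Prod.snd := PySem.List.max?_mem hpeak
  have hpeakmax : ∀ r ∈ C, r.2 ≤ peakh := fun r hr =>
    PySem.List.max?_isMax hpeak r.2 (List.mem_map_of_mem (f := Prod.snd) hr)
  obtain ⟨i, hi⟩ : ∃ i, PySem.List.index? (C.map Prod.snd) peakh = some i := by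
    cases hm : PySem.List.index? (C.map Prod.snd) peakh with
    | none =>
      rw [PySem.List.index?_eq_none_iff] at hm
      exact absurd hpeakmem hm
    | some j => exact ⟨j, rfl⟩
  obtain ⟨hilen0, hCi0, -⟩ := PySem.List.getElem_of_index?_eq_some hi
  have hilen : i < C.length := by simpa using hilen0
  have hCi : C[i].2 = peakh := by
    have h2 := hCi0
    rw [List.getElem_map] at h2
    exact h2
  have hexp : figure_out_area_alt pillars
      = ((((C.drop i).zip ((C.drop i).drop 1)).reverse).foldl pvStepR
          (((C.drop i).getLastD (0, 0)).2,
           (((C.take (i + 1)).zip ((C.take (i + 1)).drop 1)).foldl pvStepL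
             (((C.take (i + 1)).headD (0, 0)).2, peakh)).2)).2 := by
    simp only [figure_out_area_alt]
    rw [← hC, hpeak]
    simp only [hi, Option.getD_some]
  obtain ⟨lh, lt', hLeq⟩ : ∃ lh lt', C.take (i + 1) = lh :: lt' := by
    cases hL : C.take (i + 1) with
    | nil =>
      exfalso
      have hl : (C.take (i + 1)).length = i + 1 := by
        rw [List.length_take]
        omega
      rw [hL] at hl
      simp at hl
    | cons a b => exact ⟨a, b, rfl⟩
  obtain ⟨rh, rt', hReq⟩ : ∃ rh rt', C.drop i = rh :: rt' := by
    cases hR : C.drop i with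
    | nil =>
      exfalso
      have hl : (C.drop i).length = C.length - i := List.length_drop
      rw [hR] at hl
      simp at hl
      omega
    | cons a b => exact ⟨a, b, rfl⟩
  have hLpw : (lh :: lt').Pairwise (fun a b => a.1 < b.1) := by
    rw [← hLeq]
    exact List.Pairwise.sublist (List.take_sublist _ _) hCpw
  have hRpw : (rh :: rt').Pairwise (fun a b => a.1 < b.1) := by
    rw [← hReq]
    exact List.Pairwise.sublist (List.drop_sublist _ _) hCpw
  have hLlast : (lh :: lt').getLast (by simp) = C[i] := by
    have hlen : (lh :: lt').length = i + 1 := by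
      rw [← hLeq, List.length_take]
      omega
    rw [List.getLast_eq_getElem, List.getElem_of_eq hLeq.symm, List.getElem_take]
    congr 1
    omega
  have hRh : rh = C[i] := by
    have h0 := List.getElem_of_eq hReq (i := 0) (by simp [hReq])
    rw [List.getElem_drop] at h0
    simpa using h0.symm
  have hRlast : (rh :: rt').getLast (by simp) = C.getLast hCne := by
    have hlen : (rh :: rt').length = C.length - i := by
      rw [← hReq, List.length_drop]
    rw [List.getLast_eq_getElem, List.getLast_eq_getElem,
      List.getElem_of_eq hReq.symm, List.getElem_drop]
    congr 1
    omega
  have hlh1 : lh = C.head hCne := by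
    have h0 := List.getElem_of_eq hLeq (i := 0) (by simp [hLeq])
    rw [List.getElem_take] at h0
    rw [List.head_eq_getElem]
    simpa using h0.symm
  have hlo : pvLo C = lh.1 := by
    rw [pvLo_sorted_head' hCne hCpw, hlh1]
  have hhi : pvHi C = (C.getLast hCne).1 := pvHi_sorted_last hCne hCpw
  have hlomem : lh ∈ C := by
    rw [hlh1]
    exact List.head_mem hCne
  have hlosplit : lh.1 ≤ C[i].1 := by
    have := pvLo_le (List.getElem_mem hilen)
    omega
  have hhisplit : C[i].1 ≤ (C.getLast hCne).1 := by
    have := pvLe_hi (List.getElem_mem hilen)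
    omega
  -- the three interval pieces of pvPhi C
  have htadL : (lh :: lt') ++ C.drop (i + 1) = C := by
    rw [← hLeq, List.take_append_drop]
  have htadR : C.take i ++ (rh :: rt') = C := by
    rw [← hReq, List.take_append_drop]
  have hLD : ∀ b ∈ C.drop (i + 1), C[i].1 < b.1 := by
    intro b hb
    have hp := (List.pairwise_append.mp (htadL ▸ hCpw)).2.2
    have := hp ((lh :: lt').getLast (by simp)) (List.getLast_mem (by simp)) b hb
    rw [hLlast] at this
    exact this
  have hRD : ∀ b ∈ C.take i, b.1 < C[i].1 := by
    intro b hb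
    have hp := (List.pairwise_append.mp (htadR ▸ hCpw)).2.2
    have := hp b hb rh (by simp)
    rw [hRh] at this
    exact this
  have hlmax_le : ∀ x : Int, lh.1 ≤ x → pvLmax C x ≤ peakh := by
    intro x hx
    apply pvMaxD_le (List.ne_nil_of_mem (pvMemL.mpr ⟨lh, hlomem, hx, rfl⟩))
    intro a ha
    obtain ⟨r, hr, _, hra⟩ := pvMemL.mp ha
    rw [← hra]
    exact hpeakmax r hr
  have hrmax_le : ∀ x : Int, x ≤ (C.getLast hCne).1 → pvRmax C x ≤ peakh := by
    intro x hx
    apply pvMaxD_le (List.ne_nil_of_mem (pvMemR.mpr ⟨C.getLast hCne, List.getLast_mem hCne, hx, rfl⟩))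
    intro a ha
    obtain ⟨r, hr, _, hra⟩ := pvMemR.mp ha
    rw [← hra]
    exact hpeakmax r hr
  have hS1 : ∑ x ∈ Finset.Ico lh.1 C[i].1, max lh.2 (pvLmax (lh :: lt') x)
      = ∑ x ∈ Finset.Ico lh.1 C[i].1, pvRoof C x := by
    apply Finset.sum_congr rfl
    intro x hx
    rw [Finset.mem_Ico] at hx
    have hlhC : lh ∈ lh :: lt' := by simp
    rw [max_eq_right (pvLe_lmax hlhC hx.1)]
    have he1 : pvLmax (lh :: lt') x = pvLmax C x := by
      rw [← htadL, pvLmax_append_skip_all (fun b hb => by have := hLD b hb; omega)]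
    unfold pvRoof
    rw [he1]
    have hle : pvLmax C x ≤ pvRmax C x := by
      have h1 := hlmax_le x hx.1
      have h2 : peakh ≤ pvRmax C x := by
        rw [← hCi]
        exact pvLe_rmax (List.getElem_mem hilen) (le_of_lt hx.2)
      omega
    rw [min_eq_left hle]
  have hS2 : ∑ x ∈ Finset.Ico C[i].1 (C[i].1 + 1), pvRoof C x = peakh := by
    rw [pvSumIcoConst (v := peakh) _ (by omega) (fun x hx1 hx2 => by
      have hxx : x = C[i].1 := by omega
      rw [hxx]
      unfold pvRoof
      have h1 : pvLmax C C[i].1 = peakh := by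
        apply le_antisymm (hlmax_le _ (by omega))
        rw [← hCi]
        exact pvLe_lmax (List.getElem_mem hilen) (le_refl _)
      have h2 : pvRmax C C[i].1 = peakh := by
        apply le_antisymm (hrmax_le _ (by omega))
        rw [← hCi]
        exact pvLe_rmax (List.getElem_mem hilen) (le_refl _)
      rw [h1, h2, min_self])]
    ring
  have hS3 : ∑ x ∈ Finset.Ico (C[i].1 + 1) ((C.getLast hCne).1 + 1),
        max ((rh :: rt').getLast (by simp)).2 (pvRmax (rh :: rt') x)
      = ∑ x ∈ Finset.Ico (C[i].1 + 1) ((C.getLast hCne).1 + 1), pvRoof C x := by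
    apply Finset.sum_congr rfl
    intro x hx
    rw [Finset.mem_Ico] at hx
    have hlastmem : (rh :: rt').getLast (by simp) ∈ rh :: rt' := List.getLast_mem (by simp)
    have hlast1 : ((rh :: rt').getLast (by simp)).1 = (C.getLast hCne).1 := by rw [hRlast]
    rw [max_eq_right (pvLe_rmax hlastmem (by omega))]
    have he1 : pvRmax (rh :: rt') x = pvRmax C x := by
      rw [← htadR, pvRmax_append_skip_all (fun b hb => by have := hRD b hb; omega)]
    unfold pvRoof
    rw [he1]
    have hle : pvRmax C x ≤ pvLmax C x := by
      have h1 := hrmax_le x (by omega)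
      have h2 : peakh ≤ pvLmax C x := by
        rw [← hCi]
        exact pvLe_lmax (List.getElem_mem hilen) (by omega)
      omega
    rw [min_eq_right hle]
  have hsL := pvSweepL lt' lh lh.2 peakh hLpw
  have hsR := pvSweepR rt' rh ((rh :: rt').getLast (by simp)).2
    (peakh + ∑ x ∈ Finset.Ico lh.1 ((lh :: lt').getLast (by simp)).1, max lh.2 (pvLmax (lh :: lt') x)) hRpw
  rw [hexp, hLeq, hReq]
  simp only [List.drop_succ_cons, List.drop_zero, List.headD_cons]
  rw [pvGetLastD_cons, hsL, hsR]
  show (peakh + ∑ x ∈ Finset.Ico lh.1 ((lh :: lt').getLast (by simp)).1, max lh.2 (pvLmax (lh :: lt') x))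
      + ∑ x ∈ Finset.Ico (rh.1 + 1) (((rh :: rt').getLast (by simp)).1 + 1),
          max ((rh :: rt').getLast (by simp)).2 (pvRmax (rh :: rt') x)
    = pvPhi C
  rw [hLlast]
  have hrh1 : rh.1 = C[i].1 := by rw [hRh]
  have hlast1 : ((rh :: rt').getLast (by simp)).1 = (C.getLast hCne).1 := by rw [hRlast]
  rw [hrh1, hlast1, hS1, hS3]
  unfold pvPhi
  rw [hlo, hhi,
    pvSumIcoSplit (fun x => pvRoof C x) (a := lh.1) (b := C[i].1)
      (c := (C.getLast hCne).1 + 1) hlosplit (by omega),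
    pvSumIcoSplit (fun x => pvRoof C x) (a := C[i].1) (b := C[i].1 + 1)
      (c := (C.getLast hCne).1 + 1) (by omega) (by omega),
    hS2]
  ring

-- ===== VERDICT (by name: the statement is the Claim_ definition above) =====
theorem figure_out_area_spec : Claim_equal_figure_out_area := by
  intro pillars _ hpre
  unfold Spec_figure_out_area
  rw [pvA_eq_phi hpre, pvB_eq_phi hpre]
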